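-- pv_equiv track=rewrite | github.com/Canbomm/UNB | 1 Semestre/Questionários/Questionário 07/Questão 06/senha.py | nao_tem_caractere_especial
-- ===== SOURCE A (Python) =====
-- def nao_tem_caractere_especial(s):
--     for caractere in s:
--         unicode = ord(caractere)
--         if unicode >= 32 and unicode <= 47:
--             return False
--         elif unicode >= 58 and unicode <= 64:
--             return False
--         elif unicode >= 91 and unicode <= 96:
--             return False
--         elif unicode >= 123 and unicode <= 126:
--             return False
--     return True
-- ===== SOURCE B (Python) =====
-- SPECIALS = ''.join(chr(c) for a, b in ((32, 48), (58, 65), (91, 97), (123, 127))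
--                    for c in range(a, b))
-- _DELETE = str.maketrans('', '', SPECIALS)
--
-- def nao_tem_caractere_especial(s):
--     return len(s.translate(_DELETE)) == len(s)
-- ===== Notes on version B (the rewrite author's own statement) =====
-- stated objective: faster
-- what changed: Instead of scanning with per-character range comparisons and an early return, B builds a delete table of the special characters, strips them out of s with str.translate, and reports True iff the stripped string keeps the full length.
import Mathlib
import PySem

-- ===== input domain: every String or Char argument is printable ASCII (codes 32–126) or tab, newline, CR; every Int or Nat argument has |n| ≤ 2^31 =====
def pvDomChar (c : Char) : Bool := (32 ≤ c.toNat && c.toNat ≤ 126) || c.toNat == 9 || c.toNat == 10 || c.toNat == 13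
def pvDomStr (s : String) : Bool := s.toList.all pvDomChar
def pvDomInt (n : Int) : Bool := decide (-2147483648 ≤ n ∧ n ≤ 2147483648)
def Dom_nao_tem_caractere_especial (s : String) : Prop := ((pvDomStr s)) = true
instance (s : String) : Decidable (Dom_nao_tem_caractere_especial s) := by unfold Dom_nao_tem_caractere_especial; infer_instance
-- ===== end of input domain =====

-- B replaces A's early-exit range-comparison scan by deleting the forbidden characters
-- (str.translate with a delete table built from the four ranges) and comparing lengths
-- (same O(n) asymptotics; measured faster in a timing run since translate runs in C).


-- ===== PORT A =====
-- the for-loop with early 'return False': structural recursion over the characters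
def pvGoA : List Char → Bool
  | [] => true
  | c :: rest =>
    let unicode : Int := c.toNat
    if 32 ≤ unicode ∧ unicode ≤ 47 then false
    else if 58 ≤ unicode ∧ unicode ≤ 64 then false
    else if 91 ≤ unicode ∧ unicode ≤ 96 then false
    else if 123 ≤ unicode ∧ unicode ≤ 126 then false
    else pvGoA rest

def nao_tem_caractere_especial (s : String) : Bool := pvGoA s.toList

-- ===== PORT B =====
-- SPECIALS = ''.join(chr(c) for a, b in ranges for c in range(a, b))
def pvSpecials : List Char :=
  (([((32 : Int), (48 : Int)), (58, 65), (91, 97), (123, 127)] : List (Int × Int)).flatMap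
    (fun p => (PySem.List.pyRange p.1 p.2 1).map (fun n => Char.ofNat n.toNat)))

-- s.translate(str.maketrans('', '', SPECIALS)): ported by hand as dropping exactly the
-- characters of SPECIALS (exact here: the delete table maps each single ASCII char to None)
def pvTranslateDelete (l : List Char) : List Char :=
  l.filter (fun c => !(pvSpecials.contains c))

-- return len(s.translate(_DELETE)) == len(s)
def nao_tem_caractere_especial_alt (s : String) : Bool :=
  (pvTranslateDelete s.toList).length == s.toList.length

-- ===== PRECONDITION & SPEC =====
def Spec_nao_tem_caractere_especial (s : String) (out : Bool) : Prop := out = nao_tem_caractere_especial_alt s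
instance (s : String) (out : Bool) : Decidable (Spec_nao_tem_caractere_especial s out) := by unfold Spec_nao_tem_caractere_especial; infer_instance

-- ===== CLAIM (what is proved, stated in full; the proofs are below) =====
def Claim_equal_nao_tem_caractere_especial : Prop := ∀ (s : String), Dom_nao_tem_caractere_especial s → Spec_nao_tem_caractere_especial s (nao_tem_caractere_especial s)

-- ===== LEMMAS AND PROOFS =====

-- A's four elif range tests, as one predicate (proof helper only)
def pvSpecial (c : Char) : Bool :=
  decide ((32 ≤ (c.toNat : Int) ∧ (c.toNat : Int) ≤ 47) ∨ (58 ≤ (c.toNat : Int) ∧ (c.toNat : Int) ≤ 64)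
    ∨ (91 ≤ (c.toNat : Int) ∧ (c.toNat : Int) ≤ 96) ∨ (123 ≤ (c.toNat : Int) ∧ (c.toNat : Int) ≤ 126))

theorem pvGoA_eq_all (l : List Char) : pvGoA l = l.all (fun c => !pvSpecial c) := by
  induction l with
  | nil => rfl
  | cons c rest ih =>
    rw [List.all_cons, ← ih]
    by_cases h1 : 32 ≤ (c.toNat : Int) ∧ (c.toNat : Int) ≤ 47
    · simp [pvGoA, pvSpecial, h1]
    · by_cases h2 : 58 ≤ (c.toNat : Int) ∧ (c.toNat : Int) ≤ 64
      · simp [pvGoA, pvSpecial, h2]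
      · by_cases h3 : 91 ≤ (c.toNat : Int) ∧ (c.toNat : Int) ≤ 96
        · simp [pvGoA, pvSpecial, h3]
        · by_cases h4 : 123 ≤ (c.toNat : Int) ∧ (c.toNat : Int) ≤ 126
          · simp [pvGoA, pvSpecial, h4]
          · simp [pvGoA, pvSpecial, Bool.and_assoc]

theorem pvContains_specials (c : Char) (h : pvDomChar c = true) :
    pvSpecials.contains c = pvSpecial c := by
  have hle : c.toNat ≤ 126 := by
    simp only [pvDomChar, Bool.or_eq_true, Bool.and_eq_true, decide_eq_true_eq, beq_iff_eq] at h
    omega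
  have hc : Char.ofNat c.toNat = c := Char.ofNat_toNat c
  rw [← hc]
  set n := c.toNat with hn
  clear_value n
  clear hc hn h
  interval_cases n <;> decide

theorem nao_tem_caractere_especial_spec : Claim_equal_nao_tem_caractere_especial := by
  intro s hDom
  unfold Spec_nao_tem_caractere_especial nao_tem_caractere_especial nao_tem_caractere_especial_alt pvTranslateDelete
  have hdom : ∀ c ∈ s.toList, pvDomChar c = true := by
    simpa [Dom_nao_tem_caractere_especial, pvDomStr, List.all_eq_true] using hDom
  rw [Bool.eq_iff_iff, pvGoA_eq_all, List.all_eq_true, beq_iff_eq,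
    List.length_filter_eq_length_iff]
  constructor
  · intro h c hc
    have := h c hc
    rw [pvContains_specials c (hdom c hc)]
    simpa using this
  · intro h c hc
    have := h c hc
    rw [pvContains_specials c (hdom c hc)] at this
    simpa using this
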